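-- pv_equiv track=rewrite | github.com/volcengine/verl | atropos/environments/intern_bootcamp/internbootcamp_lib/internbootcamp/bootcamp/cremoveextraone/cremoveextraone.py | _compute_correct_answer
-- ===== SOURCE A (Python) =====
-- import bisect
--
-- def _compute_correct_answer(p):
--     """
--     Compute correct answer using optimized approach from reference code.
--     """
--     n = len(p)
--     nums_sorted = []
--     record_prevented = [0] * (n + 2)  # +2 to avoid index issues
--
--     for num in p:
--         bisect.insort(nums_sorted, num)
--         ind = nums_sorted.index(num)
--
--         if ind == len(nums_sorted) - 1:
--             record_prevented[num] = -1
--         elif ind == len(nums_sorted) - 2: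
--             record_prevented[nums_sorted[-1]] += 1
--
--         if len(nums_sorted) > 2:
--             nums_sorted.pop(0)
--
--     mx, mx_num = -1, float('inf')
--     for num in range(1, n+1):
--         if record_prevented[num] > mx or (record_prevented[num] == mx and num < mx_num):
--             mx = record_prevented[num]
--             mx_num = num
--
--     return mx_num
-- ===== SOURCE B (Python) =====
-- def _compute_correct_answer(p):
--     """
--     Same answer as the bisect version, by a brute-force characterization:
--     an element is a record iff no earlier element is >= it (score[num] = -1),
--     and it awards a point to the prefix maximum iff exactly one earlier
--     element is >= it (that element is the prefix max, whose removal would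
--     make this one a record).
--     """
--     n = len(p)
--     record = [0] * (n + 2)
--     prefix = []
--     for num in p:
--         bigger = sum(1 for prev in prefix if prev >= num)
--         if bigger == 0:
--             record[num] = -1
--         elif bigger == 1:
--             record[max(prefix)] += 1
--         prefix.append(num)
--     best_num, best = 1, record[1]
--     for num in range(2, n + 1):
--         if record[num] > best:
--             best, best_num = record[num], num
--     return best_num
-- ===== Notes on version B (the rewrite author's own statement) =====
-- stated objective: alternative
-- what changed: Replaces A's incrementally maintained sorted top-2 buffer (insort/index/pop) with a brute-force characterization: for each element count how many earlier elements are >= it over an explicit prefix list (count 0 = record, count exactly 1 = award a point to max(prefix)), plus a plain strict-greater final scan; Pre_ excludes the empty list (A returns float('inf'), not an int) and elements outside [-(n+2), n+1] (beyond the fixed array's index range, where A may raise IndexError depending on earlier elements).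
-- outside the precondition, e.g. on _compute_correct_answer([]): A returns inf, B returns 1; on _compute_correct_answer([-1, -9170]): A returns 1, B returns 1
import Mathlib
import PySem

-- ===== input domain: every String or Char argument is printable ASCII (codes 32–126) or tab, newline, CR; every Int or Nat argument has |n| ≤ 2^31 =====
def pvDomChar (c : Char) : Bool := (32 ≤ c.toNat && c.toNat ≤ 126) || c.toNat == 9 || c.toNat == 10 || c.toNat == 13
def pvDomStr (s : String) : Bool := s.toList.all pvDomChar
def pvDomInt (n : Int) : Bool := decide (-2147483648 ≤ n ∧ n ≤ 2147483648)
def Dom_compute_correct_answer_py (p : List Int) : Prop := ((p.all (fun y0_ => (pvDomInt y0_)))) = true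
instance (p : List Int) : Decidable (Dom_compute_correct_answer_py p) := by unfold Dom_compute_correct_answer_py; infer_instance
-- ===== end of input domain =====

-- B replaces A's incrementally maintained sorted top-2 buffer by a brute-force count of
-- earlier elements ≥ the current one over an explicit prefix list (0 = record, exactly 1 =
-- point for max(prefix)) and a plain strict-greater final scan (objective: alternative).
-- Return values only; neither version mutates its argument.

-- ===== PORT A =====
-- bisect.insort(xs, v) on a list that is always kept sorted: insert v before the first
-- strictly greater element (i.e. after existing equals) — exact for sorted xs.
def pvInsortR : List Int → Int → List Int
  | [], v => [v]
  | x :: xs, v => if v < x then v :: x :: xs else x :: pvInsortR xs v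

-- one iteration of A's main loop; state = (nums_sorted, record_prevented);
-- none = the Python raised IndexError on a record_prevented access
def pvStepA (st : List Int × List Int) (num : Int) : Option (List Int × List Int) :=
  let s := pvInsortR st.1 num
  let ind := (PySem.List.index? s num).getD 0        -- nums_sorted.index(num): num ∈ s, never raises
  let rec? :=
    if ind + 1 = s.length then                       -- ind == len(nums_sorted) - 1
      PySem.List.pySet? st.2 num (-1)
    else if ind + 2 = s.length then                  -- ind == len(nums_sorted) - 2
      match PySem.List.pyGet? s (-1) with
      | some last =>
        match PySem.List.pyGet? st.2 last with       -- record_prevented[nums_sorted[-1]] += 1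
        | some v => PySem.List.pySet? st.2 last (v + 1)
        | none => none
      | none => none
    else some st.2
  match rec? with
  | some r => some (if 2 < s.length then s.tail else s, r)   -- pop(0) when len > 2
  | none => none

def compute_correct_answer_py (p : List Int) : Int :=
  let n := p.length
  let st := p.foldl (fun acc num => acc.bind (fun s => pvStepA s num))
                    (some (([] : List Int), List.replicate (n + 2) (0 : Int)))
  match st with
  | none => 0                                        -- Python raised IndexError (outside Pre_)
  | some (_, r) =>
    -- mx, mx_num = -1, float('inf'); acc.2 = none encodes mx_num = inf, so the Python
    -- comparison num < mx_num is rendered num < acc.2.getD (num+1) (true when none)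
    let fin := (PySem.List.pyRange 1 ((n : Int) + 1) 1).foldl
      (fun (acc : Int × Option Int) num =>
        if PySem.List.pyGetD r num 0 > acc.1 ∨
           (PySem.List.pyGetD r num 0 = acc.1 ∧ num < acc.2.getD (num + 1)) then
          (PySem.List.pyGetD r num 0, some num)
        else acc)
      (-1, none)
    match fin.2 with
    | some m => m
    | none => 0                                      -- returns float('inf'): p = [] (outside Pre_)

-- ===== PORT B =====
-- one iteration of B's loop; state = (record, prefix); none = IndexError on a record access;
-- bigger = sum(1 for prev in prefix if prev >= num)
def pvStepB (st : List Int × List Int) (num : Int) : Option (List Int × List Int) :=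
  let r := st.1
  let q := st.2
  let bigger := q.countP (fun prev => decide (num ≤ prev))
  if bigger = 0 then
    (PySem.List.pySet? r num (-1)).map (fun r' => (r', q ++ [num]))     -- record[num] = -1
  else if bigger = 1 then
    match PySem.List.max? q (fun x => x) with                           -- max(prefix)
    | some m =>
      match PySem.List.pyGet? r m with                                  -- record[max(prefix)] += 1
      | some v => (PySem.List.pySet? r m (v + 1)).map (fun r' => (r', q ++ [num]))
      | none => none
    | none => none
  else some (r, q ++ [num])

def compute_correct_answer_py_alt (p : List Int) : Int :=
  let n := p.length
  let st := p.foldl (fun acc num => acc.bind (fun s => pvStepB s num))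
                    (some (List.replicate (n + 2) (0 : Int), ([] : List Int)))
  match st with
  | none => 0                                        -- Python raised IndexError (outside Pre_)
  | some (r, _) =>
    let fin := (PySem.List.pyRange 2 ((n : Int) + 1) 1).foldl
      (fun (acc : Int × Int) num =>
        if PySem.List.pyGetD r num 0 > acc.2 then (num, PySem.List.pyGetD r num 0) else acc)
      (1, PySem.List.pyGetD r 1 0)                   -- best_num, best = 1, record[1]
    fin.1

-- ===== PRECONDITION & SPEC =====
-- Pre_ excludes the empty list (A returns float('inf'), not an int) and any element outside
-- [-(n+2), n+1], the index range of the fixed-size record array, beyond which A may raise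
-- IndexError (on a few such inputs A still returns — see the cites; the exact no-raise set
-- is data-dependent, not closed-form).
def Pre_compute_correct_answer_py (p : List Int) : Prop :=
  p ≠ [] ∧ ∀ x ∈ p, -((p.length : Int) + 2) ≤ x ∧ x ≤ (p.length : Int) + 1
instance (p : List Int) : Decidable (Pre_compute_correct_answer_py p) := by
  unfold Pre_compute_correct_answer_py; infer_instance

def pvWitness_compute_correct_answer_py : List Int := [2, 1, 3]

def Spec_compute_correct_answer_py (p : List Int) (out : Int) : Prop :=
  out = compute_correct_answer_py_alt p
instance (p : List Int) (out : Int) : Decidable (Spec_compute_correct_answer_py p out) := by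
  unfold Spec_compute_correct_answer_py; infer_instance

-- ===== CLAIM (what is proved, stated in full; the proofs are below) =====
def Claim_equal_compute_correct_answer_py : Prop :=
  ∀ (p : List Int), Dom_compute_correct_answer_py p → Pre_compute_correct_answer_py p →
    Spec_compute_correct_answer_py p (compute_correct_answer_py p)

-- ===== LEMMAS AND PROOFS =====

-- A's sorted window s vs the processed prefix q of B: s holds the two largest elements of
-- q (with multiplicity), everything else in q is ≤ the smaller window element
def pvRelC (q s : List Int) : Prop :=
  (q = [] ∧ s = []) ∨
  (∃ a, q = [a] ∧ s = [a]) ∨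
  (∃ a b rest, a ≤ b ∧ s = [a, b] ∧ q.Perm (a :: b :: rest) ∧ ∀ x ∈ rest, x ≤ a)

-- the record array keeps its length and all its entries stay ≥ -1
def pvInv (n : Nat) (r : List Int) : Prop :=
  r.length = n + 2 ∧ ∀ x ∈ r, -1 ≤ x

-- shapes of one iteration of A's loop, by position of num in the window
theorem pvA_nil (r : List Int) (num : Int) :
    pvStepA ([], r) num = (match PySem.List.pySet? r num (-1) with
      | some r' => some ([num], r') | none => none) := by
  simp [pvStepA, pvInsortR]

theorem pvA_one_gt (r : List Int) (num a : Int) (h : a < num) :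
    pvStepA ([a], r) num = (match PySem.List.pySet? r num (-1) with
      | some r' => some ([a, num], r') | none => none) := by
  have h1 : ¬ num < a := by omega
  have h2 : a ≠ num := by omega
  simp [pvStepA, pvInsortR, List.idxOf?, List.findIdx?_cons, h1, h2]

theorem pvA_one_le (r : List Int) (num a : Int) (h : num ≤ a) :
    pvStepA ([a], r) num = (match PySem.List.pyGet? r a with
      | some v => (match PySem.List.pySet? r a (v + 1) with
                   | some r' => some (if num < a then [num, a] else [a, a], r') | none => none)
      | none => none) := by
  by_cases h1 : num < a
  · simp [pvStepA, pvInsortR, List.idxOf?, List.findIdx?_cons, h1, PySem.List.pyGet?_neg_one]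
    cases PySem.List.pyGet? r a <;> simp
  · have h2 : num = a := by omega
    subst h2
    simp [pvStepA, pvInsortR, List.idxOf?, List.findIdx?_cons, PySem.List.pyGet?_neg_one]
    cases PySem.List.pyGet? r num <;> simp

theorem pvA_two_gt (r : List Int) (num a b : Int) (hab : a ≤ b) (h : b < num) :
    pvStepA ([a, b], r) num = (match PySem.List.pySet? r num (-1) with
      | some r' => some ([b, num], r') | none => none) := by
  have h1 : ¬ num < a := by omega
  have h2 : ¬ num < b := by omega
  have h3 : a ≠ num := by omega
  have h4 : b ≠ num := by omega
  simp [pvStepA, pvInsortR, List.idxOf?, List.findIdx?_cons, h1, h2, h3, h4]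

theorem pvA_two_mid (r : List Int) (num a b : Int) (h1 : a < num) (h2 : num ≤ b) :
    pvStepA ([a, b], r) num = (match PySem.List.pyGet? r b with
      | some v => (match PySem.List.pySet? r b (v + 1) with
                   | some r' => some ([num, b], r') | none => none)
      | none => none) := by
  have h3 : ¬ num < a := by omega
  have h4 : a ≠ num := by omega
  by_cases h5 : num < b
  · simp [pvStepA, pvInsortR, List.idxOf?, List.findIdx?_cons, h3, h4, h5, PySem.List.pyGet?_neg_one]
    cases PySem.List.pyGet? r b <;> simp
  · have h6 : num = b := by omega
    subst h6
    simp [pvStepA, pvInsortR, List.idxOf?, List.findIdx?_cons, h3, h4, PySem.List.pyGet?_neg_one]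
    cases PySem.List.pyGet? r num <;> simp

theorem pvA_two_le (r : List Int) (num a b : Int) (hab : a ≤ b) (h : num ≤ a) :
    pvStepA ([a, b], r) num = some ([a, b], r) := by
  by_cases h1 : num < a
  · simp [pvStepA, pvInsortR, List.idxOf?, List.findIdx?_cons, h1]
  · have h2 : num = a := by omega
    subst h2
    by_cases h3 : num < b
    · simp [pvStepA, pvInsortR, List.idxOf?, List.findIdx?_cons, h3]
    · have h4 : num = b := by omega
      subst h4
      simp [pvStepA, pvInsortR, List.idxOf?, List.findIdx?_cons]

theorem pvInv_set {n : Nat} {r r' : List Int} {i v : Int} (hr : pvInv n r)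
    (hv : -1 ≤ v) (h : PySem.List.pySet? r i v = some r') : pvInv n r' := by
  unfold PySem.List.pySet? at h
  rcases Option.map_eq_some_iff.mp h with ⟨k, _, rfl⟩
  refine ⟨by simpa using hr.1, fun x hx => ?_⟩
  rcases List.mem_or_eq_of_mem_set hx with hx' | rfl
  · exact hr.2 x hx'
  · exact hv

-- on a nonempty list whose elements are all ≤ b with b ∈ q, max? returns exactly b
theorem pv_max?_eq {q : List Int} {b : Int} (hb : b ∈ q) (hub : ∀ x ∈ q, x ≤ b) :
    PySem.List.max? q (fun x => x) = some b := by
  cases hm : PySem.List.max? q (fun x => x) with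
  | none =>
    rw [PySem.List.max?_eq_none_iff] at hm
    subst hm; cases hb
  | some m =>
    have h1 : m ∈ q := PySem.List.max?_mem hm
    have h2 := PySem.List.max?_isMax hm b hb
    have h3 := hub m h1
    have : m = b := le_antisymm h3 h2
    rw [this]

theorem pv_finish_set (n : Nat) (r : List Int) (i : Int) (s' q' : List Int)
    (hr : pvInv n r) (hrel : pvRelC q' s') :
    ((match PySem.List.pySet? r i (-1) with | some r' => some (s', r') | none => none) = none ∧
     (PySem.List.pySet? r i (-1)).map (fun r' => (r', q')) = none) ∨
    ∃ s'' r'' q'',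
      (match PySem.List.pySet? r i (-1) with | some r' => some (s', r') | none => none) = some (s'', r'') ∧
      (PySem.List.pySet? r i (-1)).map (fun r' => (r', q')) = some (r'', q'') ∧
      pvRelC q'' s'' ∧ pvInv n r'' := by
  cases h : PySem.List.pySet? r i (-1) with
  | none => exact Or.inl ⟨rfl, rfl⟩
  | some r' =>
    exact Or.inr ⟨s', r', q', rfl, rfl, hrel, pvInv_set hr (by norm_num) h⟩

theorem pv_finish_inc (n : Nat) (r : List Int) (i : Int) (s' q' : List Int)
    (hr : pvInv n r) (hrel : pvRelC q' s') :
    ((match PySem.List.pyGet? r i with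
      | some v => (match PySem.List.pySet? r i (v + 1) with
                   | some r' => some (s', r') | none => none)
      | none => none) = none ∧
     (match PySem.List.pyGet? r i with
      | some v => (PySem.List.pySet? r i (v + 1)).map (fun r' => (r', q'))
      | none => none) = none) ∨
    ∃ s'' r'' q'',
      (match PySem.List.pyGet? r i with
       | some v => (match PySem.List.pySet? r i (v + 1) with
                    | some r' => some (s', r') | none => none)
       | none => none) = some (s'', r'') ∧
      (match PySem.List.pyGet? r i with
       | some v => (PySem.List.pySet? r i (v + 1)).map (fun r' => (r', q'))
       | none => none) = some (r'', q'') ∧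
      pvRelC q'' s'' ∧ pvInv n r'' := by
  cases hv : PySem.List.pyGet? r i with
  | none => exact Or.inl ⟨rfl, rfl⟩
  | some v =>
    have hvr : v ∈ r := PySem.List.mem_of_pyGet?_eq_some r hv
    have hv1 : -1 ≤ v + 1 := by have := hr.2 v hvr; omega
    cases h : PySem.List.pySet? r i (v + 1) with
    | none => exact Or.inl ⟨by simp [h], by simp [h]⟩
    | some r' =>
      exact Or.inr ⟨s', r', q', by simp [h], by simp [h], hrel, pvInv_set hr hv1 h⟩

theorem pv_step_rel (n : Nat) (q s r : List Int) (num : Int)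
    (h : pvRelC q s) (hr : pvInv n r) :
    (pvStepA (s, r) num = none ∧ pvStepB (r, q) num = none) ∨
    ∃ s' r' q', pvStepA (s, r) num = some (s', r') ∧
      pvStepB (r, q) num = some (r', q') ∧ pvRelC q' s' ∧ pvInv n r' := by
  rcases h with ⟨rfl, rfl⟩ | ⟨a, rfl, rfl⟩ | ⟨a, b, rest, hab, rfl, hperm, hrest⟩
  · -- q = [], s = []
    rw [pvA_nil, show pvStepB (r, []) num
        = (PySem.List.pySet? r num (-1)).map (fun r' => (r', [num])) from by
          simp [pvStepB]]
    exact pv_finish_set n r num [num] [num] hr (Or.inr (Or.inl ⟨num, rfl, rfl⟩))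
  · -- q = [a], s = [a]
    by_cases h1 : a < num
    · have hc : ([a].countP (fun prev => decide (num ≤ prev))) = 0 := by
        simp [List.countP_cons]; omega
      rw [pvA_one_gt r num a h1, show pvStepB (r, [a]) num
          = (PySem.List.pySet? r num (-1)).map (fun r' => (r', [a, num])) from by
            simp [pvStepB, hc]]
      exact pv_finish_set n r num [a, num] [a, num] hr
        (Or.inr (Or.inr ⟨a, num, [], h1.le, rfl, List.Perm.refl _, by simp⟩))
    · have h2 : num ≤ a := by omega
      have hc : ([a].countP (fun prev => decide (num ≤ prev))) = 1 := by
        simp [List.countP_cons]; omega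
      have hmax : PySem.List.max? [a] (fun x => x) = some a :=
        pv_max?_eq (by simp) (by simp)
      rw [pvA_one_le r num a h2, show pvStepB (r, [a]) num
          = (match PySem.List.pyGet? r a with
             | some v => (PySem.List.pySet? r a (v + 1)).map (fun r' => (r', [a, num]))
             | none => none) from by simp [pvStepB, hc, hmax]]
      have hrel' : pvRelC [a, num] (if num < a then [num, a] else [a, a]) := by
        by_cases h3 : num < a
        · simp only [if_pos h3]
          exact Or.inr (Or.inr ⟨num, a, [], h3.le, rfl, List.Perm.swap _ _ _, by simp⟩)
        · have : num = a := by omega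
          subst this
          simp only [if_neg h3]
          exact Or.inr (Or.inr ⟨num, num, [], le_refl _, rfl, List.Perm.refl _, by simp⟩)
      exact pv_finish_inc n r a _ [a, num] hr hrel'
  · -- s = [a, b], q ~ a :: b :: rest with rest ≤ a
    have hcq : ∀ m : Int, q.countP (fun prev => decide (m ≤ prev))
        = (a :: b :: rest).countP (fun prev => decide (m ≤ prev)) :=
      fun m => hperm.countP_eq _
    have hmemb : b ∈ q := hperm.mem_iff.mpr (by simp)
    have hub : ∀ x ∈ q, x ≤ b := by
      intro x hx
      have hx' := hperm.mem_iff.mp hx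
      simp only [List.mem_cons] at hx'
      rcases hx' with h | h | h
      · omega
      · omega
      · exact le_trans (hrest x h) hab
    by_cases h1 : b < num
    · have hc : q.countP (fun prev => decide (num ≤ prev)) = 0 := by
        rw [hcq, List.countP_eq_zero]
        intro x hx
        simp only [List.mem_cons] at hx
        simp only [decide_eq_true_eq, not_le]
        rcases hx with rfl | rfl | hx
        · omega
        · omega
        · have := hrest x hx; omega
      rw [pvA_two_gt r num a b hab h1, show pvStepB (r, q) num
          = (PySem.List.pySet? r num (-1)).map (fun r' => (r', q ++ [num])) from by
            simp [pvStepB, hc]]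
      refine pv_finish_set n r num [b, num] (q ++ [num]) hr
        (Or.inr (Or.inr ⟨b, num, a :: rest, h1.le, rfl, ?_, ?_⟩))
      · -- q ++ [num] ~ b :: num :: a :: rest
        refine List.perm_iff_count.mpr (fun x => ?_)
        have := List.perm_iff_count.mp hperm x
        simp [List.count_append, List.count_cons] at this ⊢
        omega
      · intro x hx
        simp only [List.mem_cons] at hx
        rcases hx with rfl | hx
        · omega
        · exact le_trans (hrest x hx) (by omega)
    · by_cases h2 : a < num
      · have h3 : num ≤ b := by omega
        have hc : q.countP (fun prev => decide (num ≤ prev)) = 1 := by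
          rw [hcq]
          simp only [List.countP_cons]
          rw [List.countP_eq_zero.mpr (fun x hx => by
            simp only [decide_eq_true_eq, not_le]
            have := hrest x hx; omega)]
          simp only [decide_eq_true_eq]
          rw [if_pos (by omega), if_neg (by omega)]
        have hmax := pv_max?_eq hmemb hub
        rw [pvA_two_mid r num a b h2 h3, show pvStepB (r, q) num
            = (match PySem.List.pyGet? r b with
               | some v => (PySem.List.pySet? r b (v + 1)).map (fun r' => (r', q ++ [num]))
               | none => none) from by simp [pvStepB, hc, hmax]]
        refine pv_finish_inc n r b [num, b] (q ++ [num]) hr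
          (Or.inr (Or.inr ⟨num, b, a :: rest, h3, rfl, ?_, ?_⟩))
        · refine List.perm_iff_count.mpr (fun x => ?_)
          have := List.perm_iff_count.mp hperm x
          simp [List.count_append, List.count_cons] at this ⊢
          omega
        · intro x hx
          simp only [List.mem_cons] at hx
          rcases hx with rfl | hx
          · omega
          · exact le_trans (hrest x hx) (by omega)
      · have h3 : num ≤ a := by omega
        have hc2 : (2 : Nat) ≤ q.countP (fun prev => decide (num ≤ prev)) := by
          rw [hcq]
          simp only [List.countP_cons, decide_eq_true_eq]
          rw [if_pos (by omega), if_pos (by omega)]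
          omega
        rw [pvA_two_le r num a b hab h3, show pvStepB (r, q) num = some (r, q ++ [num]) from by
          simp only [pvStepB]
          rw [if_neg (by omega), if_neg (by omega)]]
        refine Or.inr ⟨[a, b], r, q ++ [num], rfl, rfl,
          Or.inr (Or.inr ⟨a, b, rest ++ [num], hab, rfl, ?_, ?_⟩), hr⟩
        · refine List.perm_iff_count.mpr (fun x => ?_)
          have := List.perm_iff_count.mp hperm x
          simp [List.count_append, List.count_cons] at this ⊢
          omega
        · intro x hx
          rcases List.mem_append.mp hx with hx | hx
          · exact hrest x hx
          · have : x = num := by simpa using hx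
            omega

-- none (= an IndexError already raised) propagates through both folds
theorem pv_fold_noneA (q : List Int) :
    q.foldl (fun acc num => acc.bind (fun s => pvStepA s num)) none = none := by
  induction q with
  | nil => rfl
  | cons x xs ih => simpa using ih

theorem pv_fold_noneB (q : List Int) :
    q.foldl (fun acc num => acc.bind (fun s => pvStepB s num)) none = none := by
  induction q with
  | nil => rfl
  | cons x xs ih => simpa using ih

theorem pv_fold_rel (n : Nat) (rem : List Int) :
    ∀ (q s r : List Int), pvRelC q s → pvInv n r →
    (rem.foldl (fun acc num => acc.bind (fun s => pvStepA s num)) (some (s, r)) = none ∧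
     rem.foldl (fun acc num => acc.bind (fun s => pvStepB s num)) (some (r, q)) = none) ∨
    ∃ s' r' q',
      rem.foldl (fun acc num => acc.bind (fun s => pvStepA s num)) (some (s, r)) = some (s', r') ∧
      rem.foldl (fun acc num => acc.bind (fun s => pvStepB s num)) (some (r, q)) = some (r', q') ∧
      pvRelC q' s' ∧ pvInv n r' := by
  induction rem with
  | nil =>
    intro q s r hrel hinv
    exact Or.inr ⟨s, r, q, rfl, rfl, hrel, hinv⟩
  | cons num rem ih =>
    intro q s r hrel hinv
    rcases pv_step_rel n q s r num hrel hinv with ⟨ha, hb⟩ | ⟨s', r', q', ha, hb, hrel', hinv'⟩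
    · exact Or.inl ⟨by simp [ha, pv_fold_noneA], by simp [hb, pv_fold_noneB]⟩
    · rcases ih q' s' r' hrel' hinv' with ⟨ha2, hb2⟩ | ⟨s'', r'', q'', ha2, hb2, hrel'', hinv''⟩
      · exact Or.inl ⟨by simpa [ha] using ha2, by simpa [hb] using hb2⟩
      · exact Or.inr ⟨s'', r'', q'', by simpa [ha] using ha2, by simpa [hb] using hb2, hrel'', hinv''⟩

-- the two final scans agree once the current best index m is below everything still to come
theorem pv_scan (r : List Int) (L : List Int) :
    ∀ (mx m : Int), L.Pairwise (· < ·) → (∀ x ∈ L, m < x) →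
    L.foldl
      (fun (acc : Int × Option Int) num =>
        if PySem.List.pyGetD r num 0 > acc.1 ∨
           (PySem.List.pyGetD r num 0 = acc.1 ∧ num < acc.2.getD (num + 1)) then
          (PySem.List.pyGetD r num 0, some num)
        else acc) (mx, some m)
    = ((L.foldl (fun (acc : Int × Int) num =>
          if PySem.List.pyGetD r num 0 > acc.2 then (num, PySem.List.pyGetD r num 0) else acc) (m, mx)).2,
       some (L.foldl (fun (acc : Int × Int) num =>
          if PySem.List.pyGetD r num 0 > acc.2 then (num, PySem.List.pyGetD r num 0) else acc) (m, mx)).1) := by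
  induction L with
  | nil => intro mx m _ _; rfl
  | cons num L ihL =>
    intro mx m hpw hlt
    have hmnum : m < num := hlt num (by simp)
    have hpw' := (List.pairwise_cons.mp hpw).2
    have hnext := (List.pairwise_cons.mp hpw).1
    by_cases hgt : PySem.List.pyGetD r num 0 > mx
    · simp only [List.foldl_cons, if_pos (Or.inl hgt), if_pos hgt]
      exact ihL (PySem.List.pyGetD r num 0) num hpw' hnext
    · have hcond : ¬ (PySem.List.pyGetD r num 0 > mx ∨
          (PySem.List.pyGetD r num 0 = mx ∧ num < (some m : Option Int).getD (num + 1))) := by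
        rintro (h1 | ⟨h2, h3⟩)
        · exact hgt h1
        · simp only [Option.getD_some] at h3; omega
      simp only [List.foldl_cons, if_neg hcond, if_neg hgt]
      exact ihL mx m hpw' (fun x hx => hlt x (by simp [hx]))

-- the whole final section: A's tie-breaking scan over 1..n equals B's strict scan from record[1]
theorem pv_final (r : List Int) (n : Nat) (hn : 1 ≤ n) (hinv : pvInv n r) :
    (match ((PySem.List.pyRange 1 ((n : Int) + 1) 1).foldl
        (fun (acc : Int × Option Int) num =>
          if PySem.List.pyGetD r num 0 > acc.1 ∨
             (PySem.List.pyGetD r num 0 = acc.1 ∧ num < acc.2.getD (num + 1)) then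
            (PySem.List.pyGetD r num 0, some num)
          else acc) (-1, none)).2 with
     | some m => m
     | none => 0)
    = ((PySem.List.pyRange 2 ((n : Int) + 1) 1).foldl
        (fun (acc : Int × Int) num =>
          if PySem.List.pyGetD r num 0 > acc.2 then (num, PySem.List.pyGetD r num 0) else acc)
        (1, PySem.List.pyGetD r 1 0)).1 := by
  have hg1 : -1 ≤ PySem.List.pyGetD r 1 0 := by
    have hmem : PySem.List.pyGetD r 1 0 ∈ r := by
      apply PySem.List.pyGetD_mem
      constructor <;> · rw [hinv.1]; omega
    exact hinv.2 _ hmem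
  rw [PySem.List.pyRange_one_cons (by omega), List.foldl_cons]
  have hstep1 : (if PySem.List.pyGetD r 1 0 > (-1 : Int) ∨
      (PySem.List.pyGetD r 1 0 = (-1 : Int) ∧ (1 : Int) < (none : Option Int).getD (1 + 1)) then
      (PySem.List.pyGetD r 1 0, some (1 : Int))
    else ((-1 : Int), (none : Option Int))) = (PySem.List.pyGetD r 1 0, some (1 : Int)) := by
    by_cases hgt : PySem.List.pyGetD r 1 0 > -1
    · rw [if_pos (Or.inl hgt)]
    · have heq : PySem.List.pyGetD r 1 0 = -1 := by omega
      rw [if_pos (Or.inr ⟨heq, by norm_num⟩), heq]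
  rw [hstep1, pv_scan r _ (PySem.List.pyGetD r 1 0) 1 (PySem.List.pairwise_lt_pyRange_one _ _)
      (fun x hx => by rw [PySem.List.mem_pyRange_one] at hx; omega)]
  norm_num

-- ===== VERDICT (by name: the statement is the Claim_ definition above) =====
theorem compute_correct_answer_py_spec : Claim_equal_compute_correct_answer_py := by
  intro p _ hpre
  unfold Spec_compute_correct_answer_py
  have hn1 : 1 ≤ p.length := by
    cases p with
    | nil => exact absurd rfl hpre.1
    | cons x xs => simp
  have hinv : pvInv p.length (List.replicate (p.length + 2) (0 : Int)) := by
    refine ⟨by simp, fun x hx => ?_⟩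
    rw [List.eq_of_mem_replicate hx]; norm_num
  rcases pv_fold_rel p.length p [] [] (List.replicate (p.length + 2) (0 : Int))
      (Or.inl ⟨rfl, rfl⟩) hinv with ⟨ha, hb⟩ | ⟨s', r', q', ha, hb, _, hinv'⟩
  · simp only [compute_correct_answer_py, compute_correct_answer_py_alt, ha, hb]
  · simp only [compute_correct_answer_py, compute_correct_answer_py_alt, ha, hb]
    exact pv_final r' p.length hn1 hinv'
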